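-- pv_equiv track=rewrite | github.com/kaushalkchoudhary/iris-bhubaneshwar | inference-backend/ANPR-VCC_analytics/anpr_vcc/src/core/ocr.py | correct_o_zero_confusion
-- ===== SOURCE A (Python) =====
-- def correct_o_zero_confusion(text):
--     """Smart O/0 correction based on Indian plate format.
--
--     Indian format: KA01AB1234
--     - Positions 0-1: State code (letters) - keep 'O'
--     - Positions 2-3: District code (numbers) - 'O' → '0'
--     - Positions 4-5: Series (letters) - keep 'O'
--     - Positions 6-9: Number (digits) - 'O' → '0'
--     """
--     if len(text) < 4:
--         # Too short to apply smart correction, just return as-is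
--         return text
--
--     corrected = list(text)
--
--     # Positions that should be numeric (district code + number portion)
--     # For standard 10-char format: positions 2,3 and 6,7,8,9
--     # For 9-char format: positions 2,3 and 5,6,7,8
--     numeric_positions = set()
--
--     if len(text) >= 10:
--         # Standard format: KA01AB1234
--         numeric_positions = {2, 3, 6, 7, 8, 9}
--     elif len(text) == 9:
--         # Compact format: KA01A1234
--         numeric_positions = {2, 3, 5, 6, 7, 8}
--     else:
--         # Fallback: assume last 4 chars are numbers
--         numeric_positions = set(range(len(text) - 4, len(text)))
--
--     # Apply O → 0 correction only in numeric positions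
--     for i in numeric_positions:
--         if i < len(corrected) and corrected[i] == 'O':
--             corrected[i] = '0'
--
--     return ''.join(corrected)
-- ===== SOURCE B (Python) =====
-- def correct_o_zero_confusion(text):
--     n = len(text)
--     if n < 4:
--         return text
--     if n >= 10:
--         # KA 01 AB 1234 ...
--         return (text[:2] + text[2:4].replace('O', '0') + text[4:6]
--                 + text[6:10].replace('O', '0') + text[10:])
--     if n == 9:
--         # KA 01 A 1234
--         return text[:2] + text[2:4].replace('O', '0') + text[4:5] + text[5:9].replace('O', '0')
--     # fallback: last 4 chars are numeric
--     return text[:n - 4] + text[n - 4:].replace('O', '0')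
-- ===== Notes on version B (the rewrite author's own statement) =====
-- stated objective: simpler
-- what changed: Replaces the mutable char-list plus position-set membership loop with direct segment-wise slicing: the string is split into its letter/number segments per branch and str.replace('O','0') is applied only to the numeric segments.
import Mathlib
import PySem

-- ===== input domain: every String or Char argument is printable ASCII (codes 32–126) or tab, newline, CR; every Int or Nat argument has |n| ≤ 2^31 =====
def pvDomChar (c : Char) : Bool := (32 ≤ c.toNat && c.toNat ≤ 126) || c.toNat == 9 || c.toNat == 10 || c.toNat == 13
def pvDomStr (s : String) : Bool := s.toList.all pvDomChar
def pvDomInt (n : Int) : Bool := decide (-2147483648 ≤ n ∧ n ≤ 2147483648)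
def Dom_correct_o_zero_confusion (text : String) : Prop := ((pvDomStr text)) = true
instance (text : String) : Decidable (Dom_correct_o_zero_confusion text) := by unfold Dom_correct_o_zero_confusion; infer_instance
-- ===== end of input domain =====

-- B replaces A's mutable char-list + position-set membership loop by segment-wise slicing
-- with str.replace('O','0') on the numeric segments only (objective: simpler).


-- ===== PORT A =====
-- one iteration of A's loop: `if i < len(corrected) and corrected[i] == 'O': corrected[i] = '0'`
-- (c[i]? = some 'O' bundles the bound check with the comparison)
def pvFixAt (l : List Char) (i : Nat) : List Char :=
  if l[i]? = some 'O' then l.set i '0' else l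

def correct_o_zero_confusion (text : String) : String :=
  if text.toList.length < 4 then text
  else
    let corrected := text.toList
    -- the Python position SETS, written as lists; iteration order is immaterial
    -- (each position is corrected independently), so any enumeration is faithful
    let numeric_positions : List Nat :=
      if 10 ≤ text.toList.length then [2, 3, 6, 7, 8, 9]
      else if text.toList.length = 9 then [2, 3, 5, 6, 7, 8]
      else List.range' (text.toList.length - 4) 4   -- set(range(len-4, len))
    String.ofList (numeric_positions.foldl pvFixAt corrected)

-- ===== PORT B =====
def correct_o_zero_confusion_alt (text : String) : String :=
  let n := text.toList.length
  if n < 4 then text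
  else if 10 ≤ n then
    PySem.Str.slice text none (some 2)
      ++ PySem.Str.replace (PySem.Str.slice text (some 2) (some 4)) "O" "0"
      ++ PySem.Str.slice text (some 4) (some 6)
      ++ PySem.Str.replace (PySem.Str.slice text (some 6) (some 10)) "O" "0"
      ++ PySem.Str.slice text (some 10) none
  else if n = 9 then
    PySem.Str.slice text none (some 2)
      ++ PySem.Str.replace (PySem.Str.slice text (some 2) (some 4)) "O" "0"
      ++ PySem.Str.slice text (some 4) (some 5)
      ++ PySem.Str.replace (PySem.Str.slice text (some 5) (some 9)) "O" "0"
  else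
    PySem.Str.slice text none (some ((n : Int) - 4))
      ++ PySem.Str.replace (PySem.Str.slice text (some ((n : Int) - 4)) none) "O" "0"

-- ===== PRECONDITION & SPEC =====
def Spec_correct_o_zero_confusion (text : String) (out : String) : Prop := out = correct_o_zero_confusion_alt text
instance (text : String) (out : String) : Decidable (Spec_correct_o_zero_confusion text out) := by unfold Spec_correct_o_zero_confusion; infer_instance

-- ===== CLAIM (what is proved, stated in full; the proofs are below) =====
def Claim_equal_correct_o_zero_confusion : Prop := ∀ (text : String), Dom_correct_o_zero_confusion text → Spec_correct_o_zero_confusion text (correct_o_zero_confusion text)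

-- ===== LEMMAS AND PROOFS =====

-- the character-level O→0 correction
def pvF (c : Char) : Char := if c = 'O' then '0' else c

theorem pvF_idem (c : Char) : pvF (pvF c) = pvF c := by
  unfold pvF; split_ifs with h1 h2 <;> simp_all

theorem replace_go_eq (fuel : Nat) : ∀ (l acc : List Char), l.length ≤ fuel →
    PySem.Chars.replace.go ['O'] ['0'] fuel l acc = acc.reverse ++ l.map pvF := by
  induction fuel with
  | zero =>
    intro l acc h
    have : l = [] := by cases l <;> simp_all
    subst this
    simp [PySem.Chars.replace.go]
  | succ n ih =>
    intro l acc h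
    cases l with
    | nil => simp [PySem.Chars.replace.go]
    | cons c t =>
      by_cases hc : c = 'O'
      · subst hc
        rw [PySem.Chars.replace.go]
        rw [if_pos (by simp [List.isPrefixOf])]
        simp only [List.length_cons, List.length_nil, List.drop_succ_cons, List.drop_zero,
          List.reverse_cons, List.reverse_nil, List.nil_append]
        rw [show (['0'] ++ acc : List Char) = '0' :: acc from rfl,
          ih t ('0' :: acc) (by simpa using h)]
        simp [pvF]
      · rw [PySem.Chars.replace.go]
        rw [if_neg (by simp [List.isPrefixOf]; exact fun h => absurd h.symm hc)]
        rw [ih t (c :: acc) (by simpa using h)]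
        simp [pvF, hc]

theorem replace_eq_map (l : List Char) : PySem.Chars.replace l ['O'] ['0'] = l.map pvF := by
  unfold PySem.Chars.replace
  rw [if_neg (by simp)]
  simpa using replace_go_eq l.length l [] le_rfl

theorem fixAt_getElem? (cs : List Char) (i j : Nat) :
    (pvFixAt cs i)[j]? = if j = i then cs[j]?.map pvF else cs[j]? := by
  unfold pvFixAt
  by_cases hc : cs[i]? = some 'O'
  · rw [if_pos hc, List.getElem?_set]
    by_cases hij : j = i
    · subst hij
      rw [if_pos rfl, if_pos rfl, if_pos (by exact (List.getElem?_eq_some_iff.mp hc).1), hc]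
      simp [pvF]
    · rw [if_neg (fun h => hij h.symm), if_neg hij]
  · rw [if_neg hc]
    by_cases hij : j = i
    · subst hij
      rw [if_pos rfl]
      cases h : cs[j]? with
      | none => rfl
      | some c =>
        have : c ≠ 'O' := fun hh => hc (hh ▸ h)
        simp [pvF, this]
    · rw [if_neg hij]

theorem fold_getElem? (P : List Nat) : ∀ (cs : List Char) (j : Nat),
    (P.foldl pvFixAt cs)[j]? = if j ∈ P then cs[j]?.map pvF else cs[j]? := by
  induction P with
  | nil => simp
  | cons i P' ih =>
    intro cs j
    rw [List.foldl_cons, ih, fixAt_getElem?]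
    by_cases hij : j = i
    · subst hij
      by_cases hm : j ∈ P'
      · rw [if_pos hm, if_pos rfl, if_pos (by simp)]
        cases h : cs[j]? <;> simp [pvF_idem]
      · rw [if_neg hm, if_pos rfl, if_pos (by simp)]
    · by_cases hm : j ∈ P'
      · rw [if_pos hm, if_neg hij, if_pos (by simp [hm])]
      · rw [if_neg hm, if_neg hij, if_neg (by simp [hm, hij])]

theorem branch10 (cs : List Char) (h : 10 ≤ cs.length) :
    [2,3,6,7,8,9].foldl pvFixAt cs
      = cs.take 2 ++ ((cs.drop 2).take 2).map pvF ++ (cs.drop 4).take 2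
          ++ ((cs.drop 6).take 4).map pvF ++ cs.drop 10 := by
  apply List.ext_getElem?
  intro j
  rw [fold_getElem?]
  simp only [List.getElem?_append, List.length_append, List.length_take, List.length_map,
    List.length_drop, List.getElem?_take, List.getElem?_drop, List.getElem?_map,
    List.mem_cons, List.not_mem_nil, or_false]
  split_ifs <;> first
    | rfl
    | omega
    | (congr 2; omega)

theorem branch9 (cs : List Char) (h : cs.length = 9) :
    [2,3,5,6,7,8].foldl pvFixAt cs
      = cs.take 2 ++ ((cs.drop 2).take 2).map pvF ++ (cs.drop 4).take 1
          ++ ((cs.drop 5).take 4).map pvF := by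
  apply List.ext_getElem?
  intro j
  rw [fold_getElem?]
  simp only [List.getElem?_append, List.length_append, List.length_take, List.length_map,
    List.length_drop, List.getElem?_take, List.getElem?_drop, List.getElem?_map,
    List.mem_cons, List.not_mem_nil, or_false]
  split_ifs <;> first
    | rfl
    | omega
    | (congr 2; omega)
    | (symm; simp only [Option.map_eq_none_iff, List.getElem?_eq_none_iff]; omega)
    | (simp; omega)

theorem branchFall (cs : List Char) (h : 4 ≤ cs.length) :
    (List.range' (cs.length - 4) 4).foldl pvFixAt cs
      = cs.take (cs.length - 4) ++ (cs.drop (cs.length - 4)).map pvF := by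
  apply List.ext_getElem?
  intro j
  rw [fold_getElem?]
  simp only [List.getElem?_append, List.length_take, List.length_map, List.length_drop,
    List.getElem?_take, List.getElem?_drop, List.getElem?_map, List.mem_range'_1]
  split_ifs <;> first
    | rfl
    | omega
    | (congr 2; omega)
    | (symm; simp only [Option.map_eq_none_iff, List.getElem?_eq_none_iff]; omega)
    | (simp; omega)
    | (rw [List.getElem?_eq_none (l := cs) (i := j) (by omega),
           List.getElem?_eq_none (l := cs) (i := cs.length - 4 + (j - min (cs.length - 4) cs.length)) (by omega)]; rfl)

-- ===== VERDICT (by name: the statement is the Claim_ definition above) =====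
theorem correct_o_zero_confusion_spec : Claim_equal_correct_o_zero_confusion := by
  intro text _
  unfold Spec_correct_o_zero_confusion correct_o_zero_confusion correct_o_zero_confusion_alt
  by_cases h4 : text.toList.length < 4
  · rw [if_pos h4, if_pos h4]
  · rw [if_neg h4, if_neg h4]
    by_cases h10 : 10 ≤ text.toList.length
    · rw [if_pos h10, if_pos h10]
      apply String.toList_inj.mp
      rw [String.toList_ofList, branch10 _ h10]
      simp only [String.toList_append, PySem.Str.toList_replace, PySem.Str.toList_slice,
        PySem.Chars.slice_eq_listSlice,
        PySem.List.slice_to _ (by norm_num : (0:Int) ≤ 2),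
        PySem.List.slice_from _ (by norm_num : (0:Int) ≤ 10),
        PySem.List.slice_toNat _ (by norm_num : (0:Int) ≤ 2) (by norm_num : (0:Int) ≤ 4),
        PySem.List.slice_toNat _ (by norm_num : (0:Int) ≤ 4) (by norm_num : (0:Int) ≤ 6),
        PySem.List.slice_toNat _ (by norm_num : (0:Int) ≤ 6) (by norm_num : (0:Int) ≤ 10)]
      rw [show ("O":String).toList = ['O'] from rfl, show ("0":String).toList = ['0'] from rfl]
      rw [replace_eq_map, replace_eq_map]
      simp [List.map_take, List.map_drop, List.append_assoc]
    · rw [if_neg h10, if_neg h10]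
      by_cases h9 : text.toList.length = 9
      · rw [if_pos h9, if_pos h9]
        apply String.toList_inj.mp
        rw [String.toList_ofList, branch9 _ h9]
        simp only [String.toList_append, PySem.Str.toList_replace, PySem.Str.toList_slice,
          PySem.Chars.slice_eq_listSlice,
          PySem.List.slice_to _ (by norm_num : (0:Int) ≤ 2),
          PySem.List.slice_toNat _ (by norm_num : (0:Int) ≤ 2) (by norm_num : (0:Int) ≤ 4),
          PySem.List.slice_toNat _ (by norm_num : (0:Int) ≤ 4) (by norm_num : (0:Int) ≤ 5),
          PySem.List.slice_toNat _ (by norm_num : (0:Int) ≤ 5) (by norm_num : (0:Int) ≤ 9)]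
        rw [show ("O":String).toList = ['O'] from rfl, show ("0":String).toList = ['0'] from rfl]
        rw [replace_eq_map, replace_eq_map]
        simp [List.map_take, List.map_drop, List.append_assoc]
      · rw [if_neg h9, if_neg h9]
        apply String.toList_inj.mp
        have hn : (0:Int) ≤ (text.toList.length : Int) - 4 := by omega
        have hnn : ((text.toList.length : Int) - 4).toNat = text.toList.length - 4 := by omega
        rw [String.toList_ofList, branchFall _ (by omega)]
        simp only [String.toList_append, PySem.Str.toList_replace, PySem.Str.toList_slice,
          PySem.Chars.slice_eq_listSlice,
          PySem.List.slice_to _ hn, PySem.List.slice_from _ hn, hnn]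
        rw [show ("O":String).toList = ['O'] from rfl, show ("0":String).toList = ['0'] from rfl]
        rw [replace_eq_map]
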